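-- pv_equiv track=rewrite | github.com/Jammy2211/PyAutoCTI | autocti/charge_injection/ci_util.py | region_list_ci_via_electronics_from
-- ===== SOURCE A (Python) =====
-- from typing import Dict, List, Optional, Tuple
--
-- def region_list_ci_via_electronics_from(
--     injection_on: int,
--     injection_off: int,
--     injection_total: int,
--     parallel_size: int,
--     serial_size: int,
--     serial_prescan_size: int,
--     serial_overscan_size: int,
--     roe_corner: Tuple[int, int],
-- ):
--
--     region_list_ci = []
--
--     injection_start_count = 0
--
--     for index in range(injection_total):
--
--         if roe_corner == (0, 0):
--
--             ci_region = (
--                 parallel_size - (injection_start_count + injection_on),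
--                 parallel_size - injection_start_count,
--                 serial_prescan_size,
--                 serial_size - serial_overscan_size,
--             )
--
--         elif roe_corner == (1, 0):
--
--             ci_region = (
--                 injection_start_count,
--                 injection_start_count + injection_on,
--                 serial_prescan_size,
--                 serial_size - serial_overscan_size,
--             )
--
--         elif roe_corner == (0, 1):
--
--             ci_region = (
--                 parallel_size - (injection_start_count + injection_on),
--                 parallel_size - injection_start_count,
--                 serial_overscan_size,
--                 serial_size - serial_prescan_size,
--             )
--
--         elif roe_corner == (1, 1):
--
--             ci_region = (
--                 injection_start_count,
--                 injection_start_count + injection_on,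
--                 serial_overscan_size,
--                 serial_size - serial_prescan_size,
--             )
--
--         region_list_ci.append(ci_region)
--
--         injection_start_count += injection_on + injection_off
--
--     return region_list_ci
-- ===== SOURCE B (Python) =====
-- def region_list_ci_via_electronics_from(
--     injection_on,
--     injection_off,
--     injection_total,
--     parallel_size,
--     serial_size,
--     serial_prescan_size,
--     serial_overscan_size,
--     roe_corner,
-- ):
--     step = injection_on + injection_off
--
--     # Stage 1: build the canonical region list for corner (1, 0) recursively.
--     def canonical(n):
--         if n <= 0:
--             return []
--         s = (n - 1) * step
--         return canonical(n - 1) + [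
--             (s, s + injection_on, serial_prescan_size, serial_size - serial_overscan_size)
--         ]
--
--     regions = canonical(injection_total)
--
--     # Stage 2: mirror the row interval when the readout corner is at the top.
--     if roe_corner[0] == 0:
--         regions = [(parallel_size - r1, parallel_size - r0, c0, c1) for r0, r1, c0, c1 in regions]
--
--     # Stage 3: swap to the other serial side when the corner is on the right.
--     if roe_corner[1] == 1:
--         regions = [
--             (r0, r1, serial_overscan_size, serial_size - serial_prescan_size)
--             for r0, r1, _, _ in regions
--         ]
--
--     return regions
-- ===== Notes on version B (the rewrite author's own statement) =====
-- stated objective: alternative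
-- what changed: Instead of one loop with a running start counter and a four-way corner branch per element, B recursively builds the canonical corner-(1,0) region list once and then applies staged whole-list transformation passes: a row-mirror pass when roe_corner[0]==0 and a serial-side swap pass when roe_corner[1]==1. Pre_ excludes inputs with injection_total > 0 and a roe_corner outside the four valid corners, on which A raises UnboundLocalError.
import Mathlib
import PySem

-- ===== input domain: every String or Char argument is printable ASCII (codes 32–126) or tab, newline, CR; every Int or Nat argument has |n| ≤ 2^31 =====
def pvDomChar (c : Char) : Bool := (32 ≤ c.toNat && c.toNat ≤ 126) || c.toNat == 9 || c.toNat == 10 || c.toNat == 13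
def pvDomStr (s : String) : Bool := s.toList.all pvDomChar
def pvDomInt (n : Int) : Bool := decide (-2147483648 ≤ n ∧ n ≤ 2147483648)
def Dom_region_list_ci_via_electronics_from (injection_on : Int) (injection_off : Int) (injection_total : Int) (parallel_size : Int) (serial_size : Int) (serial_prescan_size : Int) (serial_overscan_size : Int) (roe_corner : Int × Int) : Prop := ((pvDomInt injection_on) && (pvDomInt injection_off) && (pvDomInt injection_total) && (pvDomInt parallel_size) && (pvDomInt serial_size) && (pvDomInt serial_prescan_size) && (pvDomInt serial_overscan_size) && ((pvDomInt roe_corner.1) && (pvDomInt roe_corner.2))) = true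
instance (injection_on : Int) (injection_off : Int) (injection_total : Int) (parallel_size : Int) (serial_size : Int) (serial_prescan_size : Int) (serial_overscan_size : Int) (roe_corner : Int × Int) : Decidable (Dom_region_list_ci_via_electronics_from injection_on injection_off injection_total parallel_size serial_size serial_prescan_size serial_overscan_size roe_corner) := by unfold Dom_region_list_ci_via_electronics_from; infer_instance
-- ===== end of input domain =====

-- B builds the canonical corner-(1,0) region list recursively, then applies staged
-- whole-list row-mirror / serial-side-swap passes, instead of A's single loop with a
-- running counter and a per-element four-way branch (alternative decomposition).

-- ===== PORT A =====
-- A's per-iteration four-way branch on roe_corner; the final arm is unreachable under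
-- Pre_ (Python raises UnboundLocalError there, which Pre_ excludes).
def pvCellA (injection_on parallel_size serial_size serial_prescan_size serial_overscan_size : Int)
    (roe_corner : Int × Int) (count : Int) : Int × Int × Int × Int :=
  if roe_corner = (0, 0) then
    (parallel_size - (count + injection_on), parallel_size - count,
     serial_prescan_size, serial_size - serial_overscan_size)
  else if roe_corner = (1, 0) then
    (count, count + injection_on, serial_prescan_size, serial_size - serial_overscan_size)
  else if roe_corner = (0, 1) then
    (parallel_size - (count + injection_on), parallel_size - count,
     serial_overscan_size, serial_size - serial_prescan_size)
  else if roe_corner = (1, 1) then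
    (count, count + injection_on, serial_overscan_size, serial_size - serial_prescan_size)
  else (0, 0, 0, 0)

def region_list_ci_via_electronics_from (injection_on : Int) (injection_off : Int) (injection_total : Int) (parallel_size : Int) (serial_size : Int) (serial_prescan_size : Int) (serial_overscan_size : Int) (roe_corner : Int × Int) : List (Int × Int × Int × Int) :=
  (((PySem.List.pyRange 0 injection_total 1).foldl
    (fun (st : List (Int × Int × Int × Int) × Int) _ =>
      (st.1 ++ [pvCellA injection_on parallel_size serial_size serial_prescan_size serial_overscan_size roe_corner st.2],
       st.2 + (injection_on + injection_off)))
    ([], 0))).1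

-- ===== PORT B =====
-- Source B's recursive canonical builder; Python recurses on an int with base case n <= 0,
-- ported exactly as structural recursion on the Nat injection_total.toNat (n ↦ n-1 until 0).
def pvCanonical (injection_on serial_prescan_size colhi step : Int) : Nat → List (Int × Int × Int × Int)
  | 0 => []
  | Nat.succ n =>
      pvCanonical injection_on serial_prescan_size colhi step n ++
        [((n : Int) * step, (n : Int) * step + injection_on, serial_prescan_size, colhi)]

def region_list_ci_via_electronics_from_alt (injection_on : Int) (injection_off : Int) (injection_total : Int) (parallel_size : Int) (serial_size : Int) (serial_prescan_size : Int) (serial_overscan_size : Int) (roe_corner : Int × Int) : List (Int × Int × Int × Int) :=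
  let step := injection_on + injection_off
  let regions := pvCanonical injection_on serial_prescan_size (serial_size - serial_overscan_size) step injection_total.toNat
  let regions :=
    if roe_corner.1 = 0 then
      regions.map (fun r => (parallel_size - r.2.1, parallel_size - r.1, r.2.2.1, r.2.2.2))
    else regions
  let regions :=
    if roe_corner.2 = 1 then
      regions.map (fun r => (r.1, r.2.1, serial_overscan_size, serial_size - serial_prescan_size))
    else regions
  regions

-- ===== PRECONDITION & SPEC =====
-- Pre_ excludes exactly the inputs where A raises UnboundLocalError: injection_total > 0
-- with a roe_corner that is none of the four valid corners.
def Pre_region_list_ci_via_electronics_from (injection_on : Int) (injection_off : Int) (injection_total : Int) (parallel_size : Int) (serial_size : Int) (serial_prescan_size : Int) (serial_overscan_size : Int) (roe_corner : Int × Int) : Prop :=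
  injection_total ≤ 0 ∨ roe_corner = (0, 0) ∨ roe_corner = (1, 0) ∨ roe_corner = (0, 1) ∨ roe_corner = (1, 1)
instance (injection_on : Int) (injection_off : Int) (injection_total : Int) (parallel_size : Int) (serial_size : Int) (serial_prescan_size : Int) (serial_overscan_size : Int) (roe_corner : Int × Int) : Decidable (Pre_region_list_ci_via_electronics_from injection_on injection_off injection_total parallel_size serial_size serial_prescan_size serial_overscan_size roe_corner) := by unfold Pre_region_list_ci_via_electronics_from; infer_instance

def pvWitness_region_list_ci_via_electronics_from : Int × Int × Int × Int × Int × Int × Int × (Int × Int) := (1, 1, 2, 10, 10, 1, 1, (0, 0))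

def Spec_region_list_ci_via_electronics_from (injection_on : Int) (injection_off : Int) (injection_total : Int) (parallel_size : Int) (serial_size : Int) (serial_prescan_size : Int) (serial_overscan_size : Int) (roe_corner : Int × Int) (out : List (Int × Int × Int × Int)) : Prop := out = region_list_ci_via_electronics_from_alt injection_on injection_off injection_total parallel_size serial_size serial_prescan_size serial_overscan_size roe_corner
instance (injection_on : Int) (injection_off : Int) (injection_total : Int) (parallel_size : Int) (serial_size : Int) (serial_prescan_size : Int) (serial_overscan_size : Int) (roe_corner : Int × Int) (out : List (Int × Int × Int × Int)) : Decidable (Spec_region_list_ci_via_electronics_from injection_on injection_off injection_total parallel_size serial_size serial_prescan_size serial_overscan_size roe_corner out) := by unfold Spec_region_list_ci_via_electronics_from; infer_instance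

-- ===== CLAIM (what is proved, stated in full; the proofs are below) =====
def Claim_equal_region_list_ci_via_electronics_from : Prop := ∀ (injection_on : Int) (injection_off : Int) (injection_total : Int) (parallel_size : Int) (serial_size : Int) (serial_prescan_size : Int) (serial_overscan_size : Int) (roe_corner : Int × Int), Dom_region_list_ci_via_electronics_from injection_on injection_off injection_total parallel_size serial_size serial_prescan_size serial_overscan_size roe_corner → Pre_region_list_ci_via_electronics_from injection_on injection_off injection_total parallel_size serial_size serial_prescan_size serial_overscan_size roe_corner → Spec_region_list_ci_via_electronics_from injection_on injection_off injection_total parallel_size serial_size serial_prescan_size serial_overscan_size roe_corner (region_list_ci_via_electronics_from injection_on injection_off injection_total parallel_size serial_size serial_prescan_size serial_overscan_size roe_corner)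

-- ===== LEMMAS AND PROOFS =====

-- The witness satisfies Dom and Pre.
theorem pvWitness_ok :
    Dom_region_list_ci_via_electronics_from 1 1 2 10 10 1 1 (0, 0) ∧
    Pre_region_list_ci_via_electronics_from 1 1 2 10 10 1 1 (0, 0) := by decide

-- A's fold, characterised: the fold ignores the element values, so over any list l the
-- state is the accumulated list of cells at counts c, c+step, …, plus the advanced counter.
theorem foldA_char (ion psz ssz spre sover : Int) (rc : Int × Int) (step : Int) :
    ∀ (l : List Int) (acc : List (Int × Int × Int × Int)) (c : Int),
    (l.foldl
      (fun (st : List (Int × Int × Int × Int) × Int) _ =>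
        (st.1 ++ [pvCellA ion psz ssz spre sover rc st.2], st.2 + step)) (acc, c))
      = (acc ++ (List.range l.length).map
            (fun (k : Nat) => pvCellA ion psz ssz spre sover rc (c + (k : Int) * step)),
         c + (l.length : Int) * step) := by
  intro l
  induction l with
  | nil => intro acc c; simp
  | cons x xs ih =>
    intro acc c
    rw [List.foldl_cons, ih]
    simp only [List.length_cons, List.range_succ_eq_map, List.map_cons, List.map_map,
      List.append_assoc, List.singleton_append, Prod.mk.injEq]
    refine ⟨?_, by push_cast; ring⟩
    simp only [Nat.cast_zero, zero_mul, add_zero, Function.comp_def]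
    congr 2
    refine List.map_congr_left (fun a _ => ?_)
    congr 1
    push_cast; ring

-- B's recursive canonical builder, characterised as a map over List.range.
theorem pvCanonical_eq_map (ion spre colhi step : Int) :
    ∀ n : Nat, pvCanonical ion spre colhi step n
      = (List.range n).map (fun k => ((k : Int) * step, (k : Int) * step + ion, spre, colhi)) := by
  intro n
  induction n with
  | zero => simp [pvCanonical]
  | succ m ih => simp [pvCanonical, ih, List.range_succ]

-- norm_num rewrites `map f ∘ cast` into a singleton flatMap; undo that.
theorem pvFlatSingle {α β : Type} (f : α → β) (l : List α) :
    l.flatMap (fun a => [f a]) = l.map f := by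
  induction l with
  | nil => rfl
  | cons x xs ih => simp [List.flatMap_cons, ih]

theorem region_list_ci_via_electronics_from_eq_alt (injection_on injection_off injection_total parallel_size serial_size serial_prescan_size serial_overscan_size : Int) (roe_corner : Int × Int)
    (hpre : Pre_region_list_ci_via_electronics_from injection_on injection_off injection_total parallel_size serial_size serial_prescan_size serial_overscan_size roe_corner) :
    region_list_ci_via_electronics_from injection_on injection_off injection_total parallel_size serial_size serial_prescan_size serial_overscan_size roe_corner
      = region_list_ci_via_electronics_from_alt injection_on injection_off injection_total parallel_size serial_size serial_prescan_size serial_overscan_size roe_corner := by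
  unfold region_list_ci_via_electronics_from region_list_ci_via_electronics_from_alt
  rw [PySem.List.pyRange_one, foldA_char]
  simp only [pvCanonical_eq_map, List.nil_append, List.map_map, List.length_map,
    List.length_range, Int.sub_zero]
  rcases hpre with h0 | hc | hc | hc | hc
  · have h : injection_total.toNat = 0 := by omega
    simp only [h, List.range_zero, List.map_nil]
    split_ifs <;> simp
  all_goals
    subst hc
    norm_num [pvFlatSingle]
    intro a _
    simp only [pvCellA]
    norm_num

-- ===== VERDICT (by name: the statement is the Claim_ definition above) =====
theorem region_list_ci_via_electronics_from_spec : Claim_equal_region_list_ci_via_electronics_from := by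
  intro ion ioff itot psz ssz spre sover rc _ hpre
  unfold Spec_region_list_ci_via_electronics_from
  exact region_list_ci_via_electronics_from_eq_alt ion ioff itot psz ssz spre sover rc hpre
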